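-- pv_equiv track=rewrite | github.com/russellromney/dash-access | dash_access/clients/base.py | table_fields
-- ===== SOURCE A (Python) =====
-- def table_fields(table: str) -> dict:
--     """
--     a list of all the fields that should be in the
--     table; idea is to fill all the values in with a default
--     if not in the return value from the store
--     """
--     if table == 'groups':
--         return {k:None for k in ["id","update_ts"]}
--     elif table == 'relationships':
--         return {k:None for k in ['id','principal','principal_type','granted','granted_type','ts']}
--     elif table == "access_events":
--         return {k:None for k in ["user_id","permission","ts","status"]}
--     elif table == "admin_events":
--         return {k:None for k in ["ts","table_name","operation","vals","where_val"]}
--     return {}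
-- ===== SOURCE B (Python) =====
-- # The schema as a flat relation of (table, field) rows; the result is built
-- # by a single filtering pass over that relation.
-- SCHEMA = [
--     ("groups", "id"), ("groups", "update_ts"),
--     ("relationships", "id"), ("relationships", "principal"),
--     ("relationships", "principal_type"), ("relationships", "granted"),
--     ("relationships", "granted_type"), ("relationships", "ts"),
--     ("access_events", "user_id"), ("access_events", "permission"),
--     ("access_events", "ts"), ("access_events", "status"),
--     ("admin_events", "ts"), ("admin_events", "table_name"),
--     ("admin_events", "operation"), ("admin_events", "vals"),
--     ("admin_events", "where_val"),
-- ]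
--
-- def table_fields(table: str) -> dict:
--     return {field: None for t, field in SCHEMA if t == table}
-- ===== Notes on version B (the rewrite author's own statement) =====
-- stated objective: alternative
-- what changed: Replaced the if/elif dispatch over four hard-coded dict comprehensions by a flat (table, field) relation scanned once with a filtering comprehension that collects the matching rows.
import Mathlib
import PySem

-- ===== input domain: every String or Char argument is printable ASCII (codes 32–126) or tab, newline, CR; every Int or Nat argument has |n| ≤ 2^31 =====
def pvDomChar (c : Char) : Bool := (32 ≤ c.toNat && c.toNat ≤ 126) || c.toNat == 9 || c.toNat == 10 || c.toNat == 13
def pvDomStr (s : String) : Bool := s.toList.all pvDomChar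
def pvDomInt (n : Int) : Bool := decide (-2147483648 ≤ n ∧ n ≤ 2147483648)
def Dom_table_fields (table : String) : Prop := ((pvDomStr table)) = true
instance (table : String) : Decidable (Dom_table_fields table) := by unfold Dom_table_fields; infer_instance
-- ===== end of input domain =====

-- B replaces A's if/elif chain of hard-coded dict comprehensions by one filtering pass over a flat (table, field) relation (objective: alternative).


-- ===== PORT A =====
-- literal transliteration of A's if/elif chain; each dict comprehension {k: None for k in xs}
-- (distinct keys) is xs.map (·, none)
def table_fields (table : String) : List (String × Option String) :=
  if table == "groups" then
    ["id", "update_ts"].map (fun k => (k, none))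
  else if table == "relationships" then
    ["id", "principal", "principal_type", "granted", "granted_type", "ts"].map (fun k => (k, none))
  else if table == "access_events" then
    ["user_id", "permission", "ts", "status"].map (fun k => (k, none))
  else if table == "admin_events" then
    ["ts", "table_name", "operation", "vals", "where_val"].map (fun k => (k, none))
  else []

-- ===== PORT B =====
-- the module-level flat relation SCHEMA
def SCHEMA : List (String × String) :=
  [("groups", "id"), ("groups", "update_ts"),
   ("relationships", "id"), ("relationships", "principal"),
   ("relationships", "principal_type"), ("relationships", "granted"),
   ("relationships", "granted_type"), ("relationships", "ts"),
   ("access_events", "user_id"), ("access_events", "permission"),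
   ("access_events", "ts"), ("access_events", "status"),
   ("admin_events", "ts"), ("admin_events", "table_name"),
   ("admin_events", "operation"), ("admin_events", "vals"),
   ("admin_events", "where_val")]

-- {field: None for t, field in SCHEMA if t == table}; per table the fields are distinct,
-- so the dict comprehension is the filtered rows in order, each mapped to (field, None)
def table_fields_alt (table : String) : List (String × Option String) :=
  (SCHEMA.filter (fun p => p.1 == table)).map (fun p => (p.2, none))

-- ===== PRECONDITION & SPEC =====
def Spec_table_fields (table : String) (out : List (String × Option String)) : Prop := out = table_fields_alt table
instance (table : String) (out : List (String × Option String)) : Decidable (Spec_table_fields table out) := by unfold Spec_table_fields; infer_instance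

-- ===== CLAIM (what is proved, stated in full; the proofs are below) =====
def Claim_equal_table_fields : Prop := ∀ (table : String), Dom_table_fields table → Spec_table_fields table (table_fields table)

-- ===== LEMMAS AND PROOFS =====

-- ===== VERDICT (by name: the statement is the Claim_ definition above) =====
theorem table_fields_spec : Claim_equal_table_fields := by
  intro table _
  unfold Spec_table_fields table_fields table_fields_alt SCHEMA
  by_cases h1 : table = "groups"
  · subst h1; decide
  · by_cases h2 : table = "relationships"
    · subst h2; decide
    · by_cases h3 : table = "access_events"
      · subst h3; decide
      · by_cases h4 : table = "admin_events"
        · subst h4; decide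
        · simp [h1, h2, h3, h4, beq_iff_eq, Ne.symm h1, Ne.symm h2, Ne.symm h3, Ne.symm h4]
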